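-- pv_equiv track=rewrite | github.com/DongKeun2/algorithm | Programmers/Lv2/[3차] n진수 게임.py | solution
-- ===== SOURCE A (Python) =====
-- dct = {
--     '10' : 'A',
--     '11' : 'B',
--     '12' : 'C',
--     '13' : 'D',
--     '14' : 'E',
--     '15' : 'F',
-- }
--
-- def solution(n, t, m, p):
--     def sol(x):
--         tmp = []
--         while True:
--             if x < n:
--                 tmp.append(x)
--                 break
--             tmp.append(x%n)
--             x //= n
--         return tmp[::-1]
--
--
--     num = 0
--     lst = []
--     while len(lst) < t*m:
--         lst += sol(num)
--         num += 1
--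
--     answer = ''.join(str(num) if num < 10 else dct[str(num)] for num in lst[p-1::m])[:t]
--     return answer
-- ===== SOURCE B (Python) =====
-- # B: streams the digit sequence and picks sampled positions with a countdown,
-- # never materializing the digit list; digits are produced most-significant-first
-- # by recursion and mapped to characters through one digit alphabet.
--
-- DIGITS = "0123456789ABCDEF"
--
--
-- def to_base(x, n):
--     return (to_base(x // n, n) if x >= n else "") + DIGITS[x % n]
--
--
-- def solution(n, t, m, p):
--     out = []
--     total = 0
--     wait = p - 1          # digits still to skip before the next sampled one
--     num = 0
--     while total < t * m and len(out) < t: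
--         for c in to_base(num, n):
--             if wait == 0:
--                 if len(out) < t:
--                     out.append(c)
--                 wait = m - 1
--             else:
--                 wait -= 1
--             total += 1
--         num += 1
--     return ''.join(out)
-- ===== Notes on version B (the rewrite author's own statement) =====
-- stated objective: alternative
-- what changed: B streams the base-n digits (produced most-significant-first by recursion, mapped through one digit alphabet) and selects every m-th position with a countdown on the fly, instead of materializing the whole digit list, slicing it with lst[p-1::m] and translating via a reversal loop plus a dict for A-F.
-- outside the precondition, e.g. on solution(2, 2, 2, 0): A returns '0', B returns ''; on solution(2, -1, -5, 11): A returns '1', B returns ''; on solution(17, 1, 1, 1): A returns '0', B returns '0'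
import Mathlib
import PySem

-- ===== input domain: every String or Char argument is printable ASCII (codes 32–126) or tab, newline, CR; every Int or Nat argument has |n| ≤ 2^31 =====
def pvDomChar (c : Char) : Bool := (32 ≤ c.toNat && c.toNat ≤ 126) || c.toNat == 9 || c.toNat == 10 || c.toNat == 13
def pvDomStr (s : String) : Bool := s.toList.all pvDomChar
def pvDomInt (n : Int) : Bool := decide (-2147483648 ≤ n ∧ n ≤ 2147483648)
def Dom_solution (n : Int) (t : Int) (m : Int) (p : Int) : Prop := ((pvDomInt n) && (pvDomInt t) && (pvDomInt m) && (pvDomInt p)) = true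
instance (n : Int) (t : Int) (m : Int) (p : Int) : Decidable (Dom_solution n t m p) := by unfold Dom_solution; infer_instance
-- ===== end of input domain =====

-- B streams the digit sequence and samples it with a countdown instead of materializing
-- the whole list and slicing it (objective: alternative algorithm, similar cost).

-- ===== PORT A =====

-- the module-level dict 'dct'
def pvDct : PySem.Dict String String :=
  PySem.Dict.ofList [("10", "A"), ("11", "B"), ("12", "C"), ("13", "D"), ("14", "E"), ("15", "F")]

-- inner 'while True' loop of sol: appends x%n (or the final x) to tmp (fuel = x.toNat+1,
-- enough for every input Pre_ admits; fuel runs out only where the Python diverges)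
def pvSolLoop (n : Int) (x : Int) (tmp : List Int) (fuel : Nat) : List Int :=
  match fuel with
  | 0 => tmp
  | f + 1 =>
    if x < n then tmp ++ [x]
    else pvSolLoop n (PySem.Int.floordiv x n) (tmp ++ [PySem.Int.mod x n]) f

-- sol(x): the loop above, then tmp[::-1]
def pvSol (n : Int) (x : Int) : List Int :=
  (PySem.List.slice? (pvSolLoop n x [] (x.toNat + 1)) none none (-1)).getD []

-- 'while len(lst) < t*m: lst += sol(num); num += 1'  (fuel = (t*m).toNat+1: each pass
-- appends at least one digit)
def pvLoopA (n : Int) (tm : Int) (num : Int) (lst : List Int) (fuel : Nat) : List Int :=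
  match fuel with
  | 0 => lst
  | f + 1 =>
    if (lst.length : Int) < tm then pvLoopA n tm (num + 1) (lst ++ pvSol n num) f
    else lst

-- 'str(num) if num < 10 else dct[str(num)]'; .getD "" is the KeyError case, unreachable under Pre_ (digits < n ≤ 16)
def pvPieceA (d : Int) : String :=
  if d < 10 then PySem.Int.toStr d else (PySem.Dict.get? pvDct (PySem.Int.toStr d)).getD ""

def solution (n : Int) (t : Int) (m : Int) (p : Int) : String :=
  let lst := pvLoopA n (t * m) 0 [] ((t * m).toNat + 1)
  -- lst[p-1::m]; .getD [] is the ValueError case m = 0, excluded by Pre_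
  let sampled := (PySem.List.slice? lst (some (p - 1)) none m).getD []
  PySem.Str.slice (PySem.Str.join "" (sampled.map pvPieceA)) none (some t)

-- ===== PORT B =====

-- DIGITS[x % n]; .getD ' ' is the IndexError case, unreachable under Pre_ (0 ≤ x%n < n ≤ 16)
def pvDigitChar (d : Int) : Char :=
  (PySem.Str.pyGet? "0123456789ABCDEF" d).getD ' '

-- to_base(x, n), most-significant digit first (fuel = x.toNat+1, as for pvSolLoop)
def pvToBase (n : Int) (x : Int) (fuel : Nat) : List Char :=
  match fuel with
  | 0 => []
  | f + 1 =>
    (if x ≥ n then pvToBase n (PySem.Int.floordiv x n) f else []) ++ [pvDigitChar (PySem.Int.mod x n)]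

-- body of 'for c in to_base(num, n)': state (out, total, wait)
def pvStepB (t m : Int) (st : List Char × Int × Int) (c : Char) : List Char × Int × Int :=
  if st.2.2 = 0 then
    ((if (st.1.length : Int) < t then st.1 ++ [c] else st.1), st.2.1 + 1, m - 1)
  else (st.1, st.2.1 + 1, st.2.2 - 1)

-- 'while total < t*m and len(out) < t: …'
def pvLoopB (n t m : Int) (num : Int) (out : List Char) (total wait : Int) (fuel : Nat) : List Char :=
  match fuel with
  | 0 => out
  | f + 1 =>
    if (total < t * m ∧ (out.length : Int) < t) then
      let st := (pvToBase n num (num.toNat + 1)).foldl (pvStepB t m) (out, total, wait)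
      pvLoopB n t m (num + 1) st.1 st.2.1 st.2.2 f
    else out

def solution_alt (n : Int) (t : Int) (m : Int) (p : Int) : String :=
  String.ofList (pvLoopB n t m 0 [] 0 (p - 1) ((t * m).toNat + 1))

-- ===== PRECONDITION & SPEC =====
-- Pre_ is the problem's natural domain (the statement guarantees 2 ≤ n ≤ 16 and t, m, p ≥ 1)
-- plus every degenerate input with t*m ≤ 0 and m ≠ 0 (both programs return "" there); outside it
-- A diverges (n ≤ 1), raises ZeroDivisionError/ValueError/KeyError (n = 0, m = 0, a sampled
-- digit ≥ 16), or hits accidental corners no one would specify (p ≤ 0 negative-index wraparound,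
-- t < 0 ∧ m < 0 negative-step slicing, n > 16 returning only when no digit ≥ 16 is sampled).
def Pre_solution (n : Int) (t : Int) (m : Int) (p : Int) : Prop :=
  (2 ≤ n ∧ n ≤ 16 ∧ 1 ≤ t ∧ 1 ≤ m ∧ 1 ≤ p) ∨ (t * m ≤ 0 ∧ m ≠ 0)
instance (n : Int) (t : Int) (m : Int) (p : Int) : Decidable (Pre_solution n t m p) := by
  unfold Pre_solution; infer_instance

def pvWitness_solution : Int × Int × Int × Int := (2, 4, 2, 1)

def Spec_solution (n : Int) (t : Int) (m : Int) (p : Int) (out : String) : Prop := out = solution_alt n t m p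
instance (n : Int) (t : Int) (m : Int) (p : Int) (out : String) : Decidable (Spec_solution n t m p out) := by unfold Spec_solution; infer_instance

-- ===== CLAIM (what is proved, stated in full; the proofs are below) =====
def Claim_equal_solution : Prop := ∀ (n : Int) (t : Int) (m : Int) (p : Int), Dom_solution n t m p → Pre_solution n t m p → Spec_solution n t m p (solution n t m p)

-- ===== LEMMAS AND PROOFS =====

-- the subsequence both programs sample (elements at offsets w, w+m, w+2m, …),
-- written as the countdown B uses
def pvSelF {α : Type} (m : Int) (w : Int) : List α → List α
  | [] => []
  | c :: cs => if w = 0 then c :: pvSelF m (m - 1) cs else pvSelF m (w - 1) cs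

-- countdown value after consuming a list
def pvWAfter {α : Type} (m : Int) (w : Int) : List α → Int
  | [] => w
  | _ :: cs => pvWAfter m (if w = 0 then m - 1 else w - 1) cs

theorem pvSelF_map {α β : Type} (m w : Int) (f : α → β) (xs : List α) :
    pvSelF m w (xs.map f) = (pvSelF m w xs).map f := by
  induction xs generalizing w with
  | nil => rfl
  | cons c cs ih => simp only [List.map, pvSelF]; split <;> simp [ih]

theorem pvWAfter_map {α β : Type} (m w : Int) (f : α → β) (xs : List α) :
    pvWAfter m w (xs.map f) = pvWAfter m w xs := by
  induction xs generalizing w with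
  | nil => rfl
  | cons c cs ih => simp only [List.map, pvWAfter]; exact ih _

theorem pvSelF_append {α : Type} (m w : Int) (xs ys : List α) :
    pvSelF m w (xs ++ ys) = pvSelF m w xs ++ pvSelF m (pvWAfter m w xs) ys := by
  induction xs generalizing w with
  | nil => rfl
  | cons c cs ih =>
    simp only [List.cons_append, pvSelF, pvWAfter]
    split <;> simp [ih]

theorem pvWAfter_nonneg {α : Type} (m : Int) (hm : 1 ≤ m) (w : Int) (hw : 0 ≤ w) (xs : List α) :
    0 ≤ pvWAfter m w xs := by
  induction xs generalizing w with
  | nil => exact hw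
  | cons c cs ih =>
    simp only [pvWAfter]
    exact ih _ (by split <;> omega)

theorem pvSelF_of_len_le {α : Type} (m w : Int) (xs : List α) (h : (xs.length : Int) ≤ w) :
    pvSelF m w xs = [] := by
  induction xs generalizing w with
  | nil => rfl
  | cons c cs ih =>
    simp only [List.length_cons] at h
    push_cast at h
    rw [pvSelF, if_neg (by omega)]
    exact ih (w - 1) (by omega)

theorem pvSelF_mem {α : Type} (m : Int) (xs : List α) :
    ∀ (w : Int) (a : α), a ∈ pvSelF m w xs → a ∈ xs := by
  induction xs with
  | nil => intro w a h; simp [pvSelF] at h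
  | cons c cs ih =>
    intro w a h
    rw [pvSelF] at h
    by_cases hw : w = 0
    · rw [if_pos hw] at h
      rcases List.mem_cons.mp h with h1 | h1
      · simp [h1]
      · exact List.mem_cons_of_mem _ (ih _ _ h1)
    · rw [if_neg hw] at h
      exact List.mem_cons_of_mem _ (ih _ _ h)

-- the element list slice? produces, in its own index form
def pvPicks {α : Type} (m : Int) (s : Int) (xs : List α) : List α :=
  List.filterMap (fun k : Nat => xs[(min s (xs.length : Int) + m * (k : Int)).toNat]?)
    (List.range (if min s (xs.length : Int) < (xs.length : Int)
      then (((xs.length : Int) - min s (xs.length : Int) + m - 1) / m).toNat else 0))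

theorem pvSlice?_eq_picks {α : Type} (m : Int) (hm : 0 < m) (xs : List α) (s : Int) (hs : 0 ≤ s) :
    PySem.List.slice? xs (some s) none m = some (pvPicks m s xs) := by
  unfold PySem.List.slice? PySem.List.sliceIndices pvPicks
  rw [if_neg (by omega : ¬ m = 0)]
  simp only [if_neg (by omega : ¬ m < 0), if_pos hm, if_neg (by omega : ¬ s < 0)]

theorem pvPicks_eq_selF {α : Type} (m : Int) (hm : 0 < m) (xs : List α) (s : Int) (hs : 0 ≤ s) :
    pvPicks m s xs = pvSelF m s xs := by
  induction xs generalizing s with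
  | nil => simp [pvPicks, pvSelF]
  | cons c cs ih =>
    set L : Int := (cs.length : Int) with hL
    have hL0 : 0 ≤ L := by positivity
    have hlen : ((c :: cs).length : Int) = L + 1 := by simp [hL]
    by_cases hbig : L + 1 ≤ s
    · -- start clamped to the length: empty slice, and selF skips past the end
      rw [pvPicks, hlen, min_eq_right (by omega), if_neg (by omega), List.range_zero,
        List.filterMap_nil, pvSelF_of_len_le m s (c :: cs) (by rw [hlen]; omega)]
    · have hsle : s ≤ L := by omega
      have hmin : min s (L + 1) = s := min_eq_left (by omega)
      by_cases hs0 : s = 0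
      · -- head is picked, tail continues with countdown m-1
        subst hs0
        have hcount : ((L + 1 - 0 + m - 1) / m).toNat = (L / m).toNat + 1 := by
          have h1 : L + 1 - 0 + m - 1 = L + 1 * m := by ring
          rw [h1, Int.add_mul_ediv_right _ _ (by omega : m ≠ 0)]
          have : 0 ≤ L / m := Int.ediv_nonneg hL0 (by omega)
          omega
        rw [pvPicks, hlen, hmin, if_pos (by omega), hcount, List.range_succ_eq_map,
          List.filterMap_cons, List.filterMap_map]
        have hidx0 : ((0:Int) + m * ((0:Nat):Int)).toNat = 0 := by norm_num
        simp only [hidx0, List.getElem?_cons_zero]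
        have hfun : ∀ k : Nat,
            ((fun k : Nat => (c :: cs)[((0:Int) + m * (k : Int)).toNat]?) ∘ Nat.succ) k
              = cs[(min (m - 1) L + m * (k : Int)).toNat]? := by
          intro k
          have hmk : 0 ≤ m * (k:Int) := by positivity
          show (c :: cs)[((0:Int) + m * ((k+1 : Nat) : Int)).toNat]? = _
          by_cases hml : m - 1 ≤ L
          · have hmin2 : min (m - 1) L = m - 1 := min_eq_left hml
            have hidx : ((0:Int) + m * ((k+1 : Nat) : Int)).toNat
                = (min (m - 1) L + m * (k : Int)).toNat + 1 := by
              rw [hmin2]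
              push_cast
              have h2 : m * ((k:Int) + 1) = m - 1 + m * (k:Int) + 1 := by ring
              rw [zero_add, h2]
              omega
            rw [hidx, List.getElem?_cons_succ]
          · have hmin2 : min (m - 1) L = L := min_eq_right (by omega)
            have hge1 : cs.length ≤ (min (m - 1) L + m * (k : Int)).toNat := by
              rw [hmin2]; omega
            have hge2 : (c :: cs).length ≤ ((0:Int) + m * ((k+1 : Nat) : Int)).toNat := by
              push_cast
              have h1 : m * ((k:Int) + 1) = m + m * (k:Int) := by ring
              rw [zero_add, h1]
              simp only [List.length_cons]
              omega
            rw [List.getElem?_eq_none hge1, List.getElem?_eq_none hge2]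
        rw [List.filterMap_congr (fun k _ => hfun k)]
        have htail := ih (m - 1) (by omega)
        rw [pvPicks] at htail
        rw [← hL] at htail
        have hcount2 : List.range ((L / m).toNat)
            = List.range (if min (m-1) L < L then ((L - min (m-1) L + m - 1) / m).toNat else 0) := by
          congr 1
          by_cases hml : m - 1 < L
          · rw [if_pos (by rw [min_eq_left (by omega)]; omega), min_eq_left (by omega)]
            congr 1
            congr 1
            ring
          · rw [if_neg (by rw [min_eq_right (by omega)]; omega)]
            have : L / m = 0 := Int.ediv_eq_zero_of_lt hL0 (by omega)
            omega
        rw [hcount2, htail, pvSelF, if_pos rfl]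
      · -- s ≥ 1: skip the head, tail continues with countdown s-1
        have hs1 : 1 ≤ s := by omega
        have hL1 : 1 ≤ L := by omega
        have hmin2 : min (s - 1) L = s - 1 := min_eq_left (by omega)
        rw [pvPicks, hlen, hmin, if_pos (by omega)]
        have hfun : ∀ k : Nat,
            (fun k : Nat => (c :: cs)[(s + m * (k : Int)).toNat]?) k
              = cs[(min (s - 1) L + m * (k : Int)).toNat]? := by
          intro k
          have hmk : 0 ≤ m * (k:Int) := by positivity
          show (c :: cs)[(s + m * (k : Int)).toNat]? = _
          have hidx : (s + m * (k : Int)).toNat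
              = (min (s - 1) L + m * (k : Int)).toNat + 1 := by
            rw [hmin2]; omega
          rw [hidx, List.getElem?_cons_succ]
        rw [List.filterMap_congr (fun k _ => hfun k)]
        have htail := ih (s - 1) (by omega)
        rw [pvPicks] at htail
        rw [← hL] at htail
        have hcount2 : (((L + 1) - s + m - 1) / m).toNat
            = (if min (s-1) L < L then ((L - min (s-1) L + m - 1) / m).toNat else 0) := by
          by_cases hsl : s - 1 < L
          · rw [if_pos (by rw [hmin2]; omega), hmin2]
            congr 2
            ring
          · -- s - 1 = L: one element left to consider on both sides? no: count is 1 vs 0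
            exfalso; omega
        rw [hcount2, htail, pvSelF, if_neg hs0]

theorem pvSlice?_eq_selF {α : Type} (m : Int) (hm : 0 < m) (xs : List α) (s : Int) (hs : 0 ≤ s) :
    PySem.List.slice? xs (some s) none m = some (pvSelF m s xs) := by
  rw [pvSlice?_eq_picks m hm xs s hs, pvPicks_eq_selF m hm xs s hs]

-- take k (take k a ++ b) = take k (a ++ b)
theorem pvTake_take_append {α : Type} (a : List α) :
    ∀ (k : Nat) (b : List α), List.take k (List.take k a ++ b) = List.take k (a ++ b) := by
  induction a with
  | nil => intro k b; simp
  | cons x a iha =>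
    intro k b
    cases k with
    | zero => rfl
    | succ k =>
      simp only [List.take_succ_cons, List.cons_append, List.take_succ_cons]
      exact congrArg (x :: ·) (iha k b)

-- pvSolLoop appends to its accumulator
theorem pvSolLoop_append (n : Int) (fuel : Nat) :
    ∀ (x : Int) (tmp : List Int), pvSolLoop n x tmp fuel = tmp ++ pvSolLoop n x [] fuel := by
  induction fuel with
  | zero => intro x tmp; simp [pvSolLoop]
  | succ f ih =>
    intro x tmp
    rw [pvSolLoop, pvSolLoop]
    split
    · rfl
    · rw [ih _ (tmp ++ _), ih _ ([] ++ _)]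
      simp

-- division step: x // n is a smaller nonnegative integer (2 ≤ n ≤ x)
theorem pvFloordiv_lt (n x : Int) (hn : 2 ≤ n) (hx : n ≤ x) :
    0 ≤ PySem.Int.floordiv x n ∧ (PySem.Int.floordiv x n).toNat < x.toNat := by
  have hx' : x = (x.toNat : Int) := (Int.toNat_of_nonneg (by omega)).symm
  have hn' : n = (n.toNat : Int) := (Int.toNat_of_nonneg (by omega)).symm
  rw [hx', hn', PySem.Int.floordiv_natCast]
  constructor
  · positivity
  · rw [Int.toNat_natCast]
    exact Nat.div_lt_self (by omega) (by omega)

-- the two digit extractors agree (B's chars are A's digits mapped through the alphabet)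
theorem pvToBase_eq_map (n : Int) (hn : 2 ≤ n) (fuel : Nat) :
    ∀ x : Int, 0 ≤ x → x.toNat < fuel →
      pvToBase n x fuel = ((pvSolLoop n x [] fuel).reverse).map pvDigitChar := by
  induction fuel with
  | zero => intro x hx hf; omega
  | succ f ih =>
    intro x hx hf
    rw [pvToBase, pvSolLoop]
    by_cases hlt : x < n
    · rw [if_neg (by omega), if_pos hlt]
      have hmod : PySem.Int.mod x n = x := by
        rw [PySem.Int.mod_eq_emod_of_pos (by omega : (0:Int) < n), Int.emod_eq_of_lt hx hlt]
      simp [hmod]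
    · rw [if_pos (by omega), if_neg hlt, pvSolLoop_append n f _ ([] ++ _)]
      obtain ⟨hd0, hdlt⟩ := pvFloordiv_lt n x hn (by omega)
      rw [ih _ hd0 (by omega)]
      simp

-- every digit sol produces lies in [0, n)
theorem pvSolLoop_range (n : Int) (hn : 2 ≤ n) (fuel : Nat) :
    ∀ x : Int, 0 ≤ x → x.toNat < fuel →
      ∀ d ∈ pvSolLoop n x [] fuel, 0 ≤ d ∧ d < n := by
  induction fuel with
  | zero => intro x hx hf; omega
  | succ f ih =>
    intro x hx hf d hd
    rw [pvSolLoop] at hd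
    by_cases hlt : x < n
    · rw [if_pos hlt] at hd
      simp at hd
      omega
    · rw [if_neg hlt, pvSolLoop_append n f _ ([] ++ _)] at hd
      simp at hd
      rcases hd with h | h
      · have h1 := PySem.Int.mod_nonneg x (b := n) (by omega)
        have h2 := PySem.Int.mod_lt x (b := n) (by omega)
        omega
      · obtain ⟨hd0, hdlt⟩ := pvFloordiv_lt n x hn (by omega)
        exact ih _ hd0 (by omega) d h

-- sol(x) as reverse of the loop accumulator
theorem pvSol_eq (n x : Int) :
    pvSol n x = (pvSolLoop n x [] (x.toNat + 1)).reverse := by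
  rw [pvSol, PySem.List.slice?_none_none_neg_one, Option.getD_some]

theorem pvToBase_eq_sol (n : Int) (hn : 2 ≤ n) (x : Int) (hx : 0 ≤ x) :
    pvToBase n x (x.toNat + 1) = (pvSol n x).map pvDigitChar := by
  rw [pvSol_eq, pvToBase_eq_map n hn _ x hx (by omega)]

theorem pvSol_range (n : Int) (hn : 2 ≤ n) (x : Int) (hx : 0 ≤ x) :
    ∀ d ∈ pvSol n x, 0 ≤ d ∧ d < n := by
  intro d hd
  rw [pvSol_eq, List.mem_reverse] at hd
  exact pvSolLoop_range n hn _ x hx (by omega) d hd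

-- lst is a prefix of what the A-loop returns
theorem pvLoopA_prefix (n tm : Int) (fuel : Nat) :
    ∀ (num : Int) (lst : List Int), lst <+: pvLoopA n tm num lst fuel := by
  induction fuel with
  | zero => intro num lst; rw [pvLoopA]
  | succ f ih =>
    intro num lst
    rw [pvLoopA]
    split
    · exact List.prefix_append _ _ |>.trans (ih (num + 1) (lst ++ pvSol n num))
    · rfl

-- every digit the A-loop accumulates lies in [0, n)
theorem pvLoopA_range (n tm : Int) (hn : 2 ≤ n) (fuel : Nat) :
    ∀ (num : Int) (lst : List Int), 0 ≤ num → (∀ d ∈ lst, 0 ≤ d ∧ d < n) →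
      ∀ d ∈ pvLoopA n tm num lst fuel, 0 ≤ d ∧ d < n := by
  induction fuel with
  | zero => intro num lst _ hlst d hd; rw [pvLoopA] at hd; exact hlst d hd
  | succ f ih =>
    intro num lst hnum hlst d hd
    rw [pvLoopA] at hd
    split at hd
    · refine ih (num + 1) _ (by omega) ?_ d hd
      intro e he
      rcases List.mem_append.mp he with h | h
      · exact hlst e h
      · exact pvSol_range n hn num hnum e h
    · exact hlst d hd

-- the inner for-loop over one number's characters
theorem pvFoldB (t m : Int) (ht : 0 ≤ t) (cs : List Char) :
    ∀ (out : List Char) (total wait : Int), out.length ≤ t.toNat →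
      cs.foldl (pvStepB t m) (out, total, wait)
        = (List.take t.toNat (out ++ pvSelF m wait cs), total + (cs.length : Int), pvWAfter m wait cs) := by
  induction cs with
  | nil =>
    intro out total wait hlen
    simp [pvSelF, pvWAfter, List.take_of_length_le hlen]
  | cons c cs ih =>
    intro out total wait hlen
    rw [List.foldl_cons]
    by_cases hw : wait = 0
    · by_cases hfull : (out.length : Int) < t
      · have hstep : pvStepB t m (out, total, wait) c = (out ++ [c], total + 1, m - 1) := by
          rw [pvStepB]
          simp [hw, hfull]
        rw [hstep, ih (out ++ [c]) (total + 1) (m - 1) (by simp; omega)]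
        rw [pvSelF, if_pos hw, pvWAfter, if_pos hw, List.append_assoc, List.singleton_append]
        simp only [Prod.mk.injEq, List.length_cons]
        push_cast
        and_intros <;> first | rfl | trivial | ring
      · have hout : out.length = t.toNat := by omega
        have hstep : pvStepB t m (out, total, wait) c = (out, total + 1, m - 1) := by
          rw [pvStepB]
          simp [hw, hfull]
        rw [hstep, ih out (total + 1) (m - 1) hlen]
        rw [pvSelF, if_pos hw, pvWAfter, if_pos hw, List.take_left' hout, List.take_left' hout]
        simp only [Prod.mk.injEq, List.length_cons]
        push_cast
        and_intros <;> first | rfl | trivial | ring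
    · have hstep : pvStepB t m (out, total, wait) c = (out, total + 1, wait - 1) := by
        rw [pvStepB]
        simp [hw]
      rw [hstep, ih out (total + 1) (wait - 1) hlen]
      rw [pvSelF, if_neg hw, pvWAfter, if_neg hw]
      simp only [Prod.mk.injEq, List.length_cons]
      push_cast
      and_intros <;> first | rfl | trivial | ring

-- main synchronization: B's loop computes the truncated sample of whatever A's loop appends
theorem pvMain (n t m : Int) (hn : 2 ≤ n) (ht : 1 ≤ t) (hm : 1 ≤ m) (fuel : Nat) :
    ∀ (num : Int) (lst : List Int) (out : List Char) (wait : Int),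
      0 ≤ num → out.length ≤ t.toNat → 0 ≤ wait →
      pvLoopB n t m num out (lst.length : Int) wait fuel
        = List.take t.toNat (out ++ (pvSelF m wait ((pvLoopA n (t * m) num lst fuel).drop lst.length)).map pvDigitChar) := by
  induction fuel with
  | zero =>
    intro num lst out wait _ hlen _
    rw [pvLoopB, pvLoopA]
    simp [pvSelF, List.take_of_length_le hlen]
  | succ f ih =>
    intro num lst out wait hnum hlen hwait
    rw [pvLoopB, pvLoopA]
    by_cases hcond : (lst.length : Int) < t * m
    · by_cases hfull : (out.length : Int) < t
      · rw [if_pos ⟨hcond, hfull⟩, if_pos hcond]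
        rw [pvToBase_eq_sol n hn num hnum, pvFoldB t m (by omega) _ out _ wait hlen]
        simp only [List.length_map, pvSelF_map, pvWAfter_map]
        set digs := pvSol n num with hdigs
        have hlen' : (lst.length : Int) + (digs.length : Int) = ((lst ++ digs).length : Int) := by
          simp [List.length_append]
        rw [hlen']
        rw [ih (num + 1) (lst ++ digs) _ _ (by omega)
          (by simp [List.length_take]) (pvWAfter_nonneg m hm wait hwait digs)]
        -- rewrite the drop through the prefix decomposition
        obtain ⟨rest, hrest⟩ := pvLoopA_prefix n (t * m) f (num + 1) (lst ++ digs)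
        rw [← hrest]
        have hdrop1 : ((lst ++ digs) ++ rest).drop lst.length = digs ++ rest := by
          rw [List.append_assoc, List.drop_append_of_le_length (by simp), List.drop_length]
          rfl
        have hdrop2 : ((lst ++ digs) ++ rest).drop (lst ++ digs).length = rest := by
          rw [List.drop_append_of_le_length (by omega), List.drop_length]
          rfl
        rw [hdrop1, hdrop2, pvSelF_append]
        rw [List.map_append, ← List.append_assoc, pvTake_take_append, List.append_assoc]
      · rw [if_neg (by tauto), if_pos hcond]
        have hout : out.length = t.toNat := by omega
        obtain ⟨rest, hrest⟩ := pvLoopA_prefix n (t * m) f (num + 1) (lst ++ pvSol n num)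
        rw [← hrest]
        rw [List.take_left' hout]
    · rw [if_neg (by tauto), if_neg hcond, List.drop_length]
      simp [pvSelF, List.take_of_length_le hlen]

-- an empty list sliced with any nonzero step is empty
theorem pvSlice?_nil {α : Type} (s m : Int) (hm : m ≠ 0) :
    PySem.List.slice? ([] : List α) (some s) none m = some [] := by
  unfold PySem.List.slice? PySem.List.sliceIndices
  rw [if_neg hm]
  simp

-- each piece A joins is exactly one character, B's character
theorem pvPieceA_eq (d : Int) (h0 : 0 ≤ d) (h16 : d < 16) :
    pvPieceA d = String.ofList [pvDigitChar d] := by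
  interval_cases d <;> exact rfl

-- ===== VERDICT (by name: the statement is the Claim_ definition above) =====
theorem solution_spec : Claim_equal_solution := by
  unfold Claim_equal_solution
  intro n t m p _ hpre
  unfold Spec_solution
  rcases hpre with ⟨hn2, hn16, ht, hm, hp⟩ | ⟨htm, hm0⟩
  · unfold solution solution_alt
    set L := pvLoopA n (t * m) 0 [] ((t * m).toNat + 1) with hL
    -- B side via the main lemma
    have hmain := pvMain n t m hn2 ht hm ((t * m).toNat + 1) 0 [] [] (p - 1)
      le_rfl (by simp) (by omega)
    have h0 : ((List.nil : List Int).length : Int) = 0 := by simp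
    rw [h0] at hmain
    rw [hmain]
    simp only [List.length_nil, List.drop_zero, List.nil_append, ← hL]
    -- A side: slice, join, truncate
    rw [pvSlice?_eq_selF m (by omega) L (p - 1) (by omega), Option.getD_some]
    have hrange : ∀ d ∈ pvSelF m (p - 1) L, 0 ≤ d ∧ d < 16 := by
      intro d hd
      have := pvLoopA_range n (t * m) hn2 _ 0 [] le_rfl (by simp) d (pvSelF_mem m L (p - 1) d hd)
      omega
    set sel := pvSelF m (p - 1) L with hsel
    have hjoin : PySem.Str.join "" (sel.map pvPieceA) = String.ofList (sel.map pvDigitChar) := by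
      rw [PySem.Str.join]
      congr 1
      have hparts : (sel.map pvPieceA).map String.toList = sel.map (fun d => [pvDigitChar d]) := by
        rw [List.map_map]
        refine List.map_congr_left (fun d hd => ?_)
        show (pvPieceA d).toList = [pvDigitChar d]
        rw [pvPieceA_eq d (hrange d hd).1 (hrange d hd).2, String.toList_ofList]
      have hemp : ("" : String).toList = [] := by simp
      show PySem.Chars.join ("".toList) ((sel.map pvPieceA).map String.toList) = sel.map pvDigitChar
      rw [hparts, hemp, PySem.Chars.join]
      show List.intercalate [] (sel.map (fun d => [pvDigitChar d])) = sel.map pvDigitChar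
      rw [List.intercalate]
      induction sel with
      | nil => rfl
      | cons a as iha =>
        simp only [List.map_cons]
        induction as with
        | nil => rfl
        | cons b bs ihb => simp_all
    rw [hjoin, PySem.Str.slice]
    congr 1
    show PySem.Chars.slice (String.ofList (sel.map pvDigitChar)).toList none (some t) = _
    rw [String.toList_ofList]
    show PySem.List.slice (sel.map pvDigitChar) none (some t) = _
    rw [PySem.List.slice_to _ (by omega : (0:Int) ≤ t)]

  · -- degenerate inputs: t*m ≤ 0 and m ≠ 0, both sides return ""
    unfold solution solution_alt
    show PySem.Str.slice (PySem.Str.join "" (List.map pvPieceA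
        ((PySem.List.slice? (pvLoopA n (t * m) 0 [] ((t * m).toNat + 1)) (some (p - 1)) none m).getD [])))
        none (some t) = String.ofList (pvLoopB n t m 0 [] 0 (p - 1) ((t * m).toNat + 1))
    rw [pvLoopA, if_neg (by simp; omega)]
    rw [pvSlice?_nil (p - 1) m hm0, Option.getD_some]
    rw [pvLoopB, if_neg (by rintro ⟨h1, -⟩; omega)]
    rw [List.map_nil, PySem.Str.join]
    have hemp : ("" : String).toList = [] := by simp
    rw [hemp, PySem.Chars.join]
    show PySem.Str.slice (String.ofList (List.intercalate [] [])) none (some t) = String.ofList []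
    rw [PySem.Str.slice]
    congr 1
    show PySem.Chars.slice (String.ofList (List.intercalate [] [])).toList none (some t) = []
    rw [String.toList_ofList]
    show PySem.List.slice (List.intercalate [] ([] : List (List Char))) none (some t) = []
    rw [List.intercalate]
    simp [PySem.List.slice]
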